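-- pv_equiv track=rewrite | github.com/TuksModelChecking/Satmas | implementation/NE/iterative.py | select_fair_strategy
-- ===== SOURCE A (Python) =====
-- def select_fair_strategy(past_strategy_payoffs):
--     dist = []
--     for payoff in past_strategy_payoffs:
--         values = payoff.values()
--         min_payoff = min(values)
--         max_payoff = max(values)
--
--         dist.append(abs(max_payoff - min_payoff))
--
--     return dist.index(min(dist))
-- ===== SOURCE B (Python) =====
-- def select_fair_strategy(past_strategy_payoffs):
--     best_range = None
--     best_index = None
--     for i, payoff in enumerate(past_strategy_payoffs):
--         values = payoff.values()
--         r = abs(max(values) - min(values))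
--         if best_range is None or r < best_range:
--             best_range = r
--             best_index = i
--     if best_index is None:
--         raise ValueError("select_fair_strategy: empty sequence")
--     return best_index
-- ===== Notes on version B (the rewrite author's own statement) =====
-- stated objective: simpler
-- what changed: Instead of materialising a list of all ranges and then re-scanning it twice (min, then list.index), B keeps a running best_range/best_index in a single enumerate pass, updating only on strict improvement so the first minimum wins.
import Mathlib
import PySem

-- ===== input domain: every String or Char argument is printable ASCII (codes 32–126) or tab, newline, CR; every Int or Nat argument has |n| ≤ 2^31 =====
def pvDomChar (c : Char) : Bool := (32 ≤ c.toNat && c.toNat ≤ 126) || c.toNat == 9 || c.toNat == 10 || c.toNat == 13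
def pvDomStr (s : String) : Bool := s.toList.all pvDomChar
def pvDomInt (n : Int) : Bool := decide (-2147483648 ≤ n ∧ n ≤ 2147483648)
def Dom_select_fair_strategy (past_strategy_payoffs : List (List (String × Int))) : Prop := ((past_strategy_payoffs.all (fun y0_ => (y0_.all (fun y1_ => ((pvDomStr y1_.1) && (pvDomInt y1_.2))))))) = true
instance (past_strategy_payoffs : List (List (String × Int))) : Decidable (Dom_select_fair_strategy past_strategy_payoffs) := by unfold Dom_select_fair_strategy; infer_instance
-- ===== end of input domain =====

-- B fuses A's three passes (build the list of ranges, min(), list.index) into one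
-- enumerate pass keeping a running best (strict improvement, so the first minimum wins);
-- objective: simpler (single pass, no intermediate list).

-- ===== PORT A =====
-- abs(max - min) of a payoff dict's values; Python raises ValueError on an empty
-- dict (min? /max? return none there) — those inputs are excluded by Pre_ below,
-- the port returns 0 there.
def pyRangeA (payoff : List (String × Int)) : Int :=
  let values := (PySem.Dict.mk payoff).values
  match PySem.List.min? values (fun y => y), PySem.List.max? values (fun y => y) with
  | some mn, some mx => |mx - mn|
  | _, _ => 0

def select_fair_strategy (past_strategy_payoffs : List (List (String × Int))) : Int :=
  let dist := past_strategy_payoffs.foldl (fun dist payoff => dist ++ [pyRangeA payoff]) []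
  match PySem.List.min? dist (fun y => y) with
  | some m => ((PySem.List.index? dist m).getD 0 : Nat)
  | none => 0   -- Python: min([]) raises ValueError; excluded by Pre_

-- ===== PORT B =====
def pyRangeB (payoff : List (String × Int)) : Int :=
  let values := (PySem.Dict.mk payoff).values
  match PySem.List.min? values (fun y => y), PySem.List.max? values (fun y => y) with
  | some mn, some mx => |mx - mn|
  | _, _ => 0

def select_fair_strategy_alt (past_strategy_payoffs : List (List (String × Int))) : Int :=
  let best := (PySem.List.enumerate past_strategy_payoffs 0).foldl
    (fun best ip =>
      let r := pyRangeB ip.2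
      match best with
      | none => some (r, ip.1)
      | some (b, j) => if r < b then some (r, ip.1) else some (b, j))
    (none : Option (Int × Int))
  match best with
  | some (_, i) => i
  | none => 0   -- Python: raise ValueError on empty input; excluded by Pre_

-- ===== PRECONDITION & SPEC =====
-- Pre_ excludes exactly the inputs where Python A raises ValueError: the empty
-- list (min of an empty dist) and any empty payoff dict (min of empty values).
def Pre_select_fair_strategy (past_strategy_payoffs : List (List (String × Int))) : Prop :=
  past_strategy_payoffs ≠ [] ∧ ∀ p ∈ past_strategy_payoffs, p ≠ []
instance (past_strategy_payoffs : List (List (String × Int))) : Decidable (Pre_select_fair_strategy past_strategy_payoffs) := by unfold Pre_select_fair_strategy; infer_instance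
def pvWitness_select_fair_strategy : (List (List (String × Int))) :=
  [[("a", 3), ("b", 1)], [("a", 5), ("b", 5)]]

def Spec_select_fair_strategy (past_strategy_payoffs : List (List (String × Int))) (out : Int) : Prop := out = select_fair_strategy_alt past_strategy_payoffs
instance (past_strategy_payoffs : List (List (String × Int))) (out : Int) : Decidable (Spec_select_fair_strategy past_strategy_payoffs out) := by unfold Spec_select_fair_strategy; infer_instance

-- ===== CLAIM (what is proved, stated in full; the proofs are below) =====
def Claim_equal_select_fair_strategy : Prop := ∀ (past_strategy_payoffs : List (List (String × Int))), Dom_select_fair_strategy past_strategy_payoffs → Pre_select_fair_strategy past_strategy_payoffs → Spec_select_fair_strategy past_strategy_payoffs (select_fair_strategy past_strategy_payoffs)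

-- ===== LEMMAS AND PROOFS =====

theorem pyRange_eq : pyRangeA = pyRangeB := rfl

-- A's append-loop builds the map of pyRangeA over the input.
theorem foldl_append_map (xs : List (List (String × Int))) (acc : List Int) :
    xs.foldl (fun dist payoff => dist ++ [pyRangeA payoff]) acc = acc ++ xs.map pyRangeA := by
  induction xs generalizing acc with
  | nil => simp
  | cons x t ih => simp [List.foldl_cons, ih]

-- proof-side recursion describing B's running best index
def bIdx : List Int → Int → Int → Int → Int
  | [], _, _, j => j
  | x :: t, s, b, j => if x < b then bIdx t (s+1) x s else bIdx t (s+1) b j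

theorem bIdx_cons (x : Int) (t : List Int) (s b j : Int) :
    bIdx (x :: t) s b j = if x < b then bIdx t (s+1) x s else bIdx t (s+1) b j := rfl

theorem foldB_some (xs : List (List (String × Int))) (s : Int) (b j : Int) :
    (PySem.List.enumerate xs s).foldl
      (fun best ip =>
        match best with
        | none => some (pyRangeB ip.2, ip.1)
        | some (b, j) => if pyRangeB ip.2 < b then some (pyRangeB ip.2, ip.1) else some (b, j))
      (some (b, j))
    = some ((xs.map pyRangeB).foldl min b, bIdx (xs.map pyRangeB) s b j) := by
  induction xs generalizing s b j with
  | nil => simp [bIdx]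
  | cons x t ih =>
    rw [PySem.List.enumerate_cons, List.foldl_cons, List.map_cons, List.foldl_cons, bIdx_cons]
    by_cases h : pyRangeB x < b
    · simp only [h]
      rw [show (min b (pyRangeB x)) = pyRangeB x from min_eq_right h.le] at *
      simpa [h] using ih (s+1) (pyRangeB x) s
    · simp only [h]
      rw [show (min b (pyRangeB x)) = b from min_eq_left (not_lt.mp h)] at *
      simpa [h] using ih (s+1) b j

theorem bIdx_spec (t : List Int) (s b j : Int) :
    bIdx t s b j =
      if t.foldl min b < b then s + (t.idxOf (t.foldl min b) : Int) else j := by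
  induction t generalizing s b j with
  | nil => simp [bIdx]
  | cons x t ih =>
    rw [bIdx_cons, List.foldl_cons]
    by_cases h : x < b
    · rw [if_pos h, ih, min_eq_right h.le]
      by_cases h2 : List.foldl min x t < x
      · have hne : x ≠ List.foldl min x t := (ne_of_lt h2).symm
        rw [if_pos h2, if_pos (h2.trans h), List.idxOf_cons_ne _ hne]
        push_cast; ring
      · have heq : List.foldl min x t = x := le_antisymm (PySem.List.foldl_min_le t x).1 (not_lt.mp h2)
        rw [if_neg h2, heq, if_pos h, List.idxOf_cons_self]
        simp
    · rw [if_neg h, ih, min_eq_left (not_lt.mp h)]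
      by_cases h2 : List.foldl min b t < b
      · have hne : x ≠ List.foldl min b t := (ne_of_lt (h2.trans_le (not_lt.mp h))).symm
        rw [if_pos h2, if_pos h2, List.idxOf_cons_ne _ hne]
        push_cast; ring
      · rw [if_neg h2, if_neg h2]

theorem getD_index? (d : List Int) (m : Int) (h : m ∈ d) :
    (PySem.List.index? d m).getD 0 = d.idxOf m := by
  rw [PySem.List.index?_eq_idxOf?]
  cases hidx : d.idxOf? m with
  | none => exact absurd h (by simpa using List.idxOf?_eq_none_iff.mp hidx)
  | some k => simp [List.idxOf_eq_getD_idxOf?, hidx]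

theorem idxOf_min_eq_bIdx (x : Int) (t : List Int) :
    (((x :: t).idxOf (t.foldl min x) : Nat) : Int) = bIdx t 1 x 0 := by
  rw [bIdx_spec]
  by_cases h2 : List.foldl min x t < x
  · have hne : x ≠ List.foldl min x t := (ne_of_lt h2).symm
    rw [if_pos h2, List.idxOf_cons_ne _ hne]
    push_cast; ring
  · have heq : List.foldl min x t = x := le_antisymm (PySem.List.foldl_min_le t x).1 (not_lt.mp h2)
    rw [if_neg h2, heq, List.idxOf_cons_self]
    simp

-- ===== VERDICT (by name: the statement is the Claim_ definition above) =====
theorem select_fair_strategy_spec : Claim_equal_select_fair_strategy := by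
  intro xs _ _
  unfold Spec_select_fair_strategy select_fair_strategy select_fair_strategy_alt
  rw [foldl_append_map]
  cases xs with
  | nil => rfl
  | cons p rest =>
    rw [PySem.List.enumerate_cons, List.foldl_cons]
    simp only [zero_add]
    rw [foldB_some rest 1 (pyRangeB p) 0]
    rw [List.nil_append, List.map_cons, PySem.List.min?_id_cons]
    simp only []
    have hmem : List.foldl min (pyRangeA p) (rest.map pyRangeA) ∈ (pyRangeA p :: rest.map pyRangeA) := by
      rcases PySem.List.foldl_min_mem (rest.map pyRangeA) (pyRangeA p) with h | h
      · rw [h]; exact List.mem_cons_self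
      · exact List.mem_cons_of_mem _ h
    rw [getD_index? _ _ hmem, ← pyRange_eq]
    exact idxOf_min_eq_bIdx (pyRangeA p) (rest.map pyRangeA)
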